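-- pv_equiv track=rewrite | github.com/choiyounghwan123/baekjoon | 프로그래머스/1/1845. 폰켓몬/폰켓몬.py | solution
-- ===== SOURCE A (Python) =====
-- from collections import Counter
--
-- def solution(nums):
--     answer = 0
--     counter = Counter(nums)
--     target = len(nums) // 2
--     arr = set()
--     while target > 0:
--         for key,item in counter.items():
--             arr.add(key)
--             counter[key] -=1
--             target -= 1
--             if target <= 0:
--                 break
--
--
--     return len(arr)
-- ===== SOURCE B (Python) =====
-- def solution(nums):
--     # closed form: you may pick at most len(nums)//2 pokemon, and at most
--     # one of each distinct kind, so the answer is the smaller of the two.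
--     return min(len(set(nums)), len(nums) // 2)
-- ===== Notes on version B (the rewrite author's own statement) =====
-- stated objective: simpler
-- what changed: Replaced the Counter build plus the decrement-until-target while/for accumulation loop with the loop-free closed form min(len(set(nums)), len(nums)//2).
import Mathlib
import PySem

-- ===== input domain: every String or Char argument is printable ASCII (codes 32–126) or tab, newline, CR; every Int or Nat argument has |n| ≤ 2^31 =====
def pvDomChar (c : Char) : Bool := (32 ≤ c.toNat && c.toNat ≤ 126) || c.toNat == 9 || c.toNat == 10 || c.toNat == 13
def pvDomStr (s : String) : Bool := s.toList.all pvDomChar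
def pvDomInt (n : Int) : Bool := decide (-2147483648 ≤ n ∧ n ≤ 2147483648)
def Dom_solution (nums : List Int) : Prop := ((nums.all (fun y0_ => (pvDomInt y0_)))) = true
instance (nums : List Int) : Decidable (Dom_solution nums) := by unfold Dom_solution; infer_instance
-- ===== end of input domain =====

-- B replaces A's Counter + decrement-until-target while/for loop by the loop-free
-- closed form min(len(set(nums)), len(nums)//2); same return value, simpler.

-- ===== PORT A =====
-- the 'for key,item in counter.items()' body with its break (returns counter, arr, target)
def solutionFor : List (Int × Int) → PySem.Dict Int Int → PySem.Set Int → Int →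
    PySem.Dict Int Int × PySem.Set Int × Int
  | [], c, arr, t => (c, arr, t)
  | (key, _item) :: rest, c, arr, t =>
      let arr := PySem.Set.add arr key            -- arr.add(key)
      let c := c.modify key 0 (· - 1)             -- counter[key] -= 1
      let t := t - 1                              -- target -= 1
      if t ≤ 0 then (c, arr, t)                   -- if target <= 0: break
      else solutionFor rest c arr t

-- t strictly decreases across one non-empty pass (termination of the while loop)
theorem solutionFor_t_le (l : List (Int × Int)) (c : PySem.Dict Int Int)
    (arr : PySem.Set Int) (t : Int) : (solutionFor l c arr t).2.2 ≤ t := by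
  induction l generalizing c arr t with
  | nil => simp [solutionFor]
  | cons p rest ih =>
      obtain ⟨k, v⟩ := p
      simp only [solutionFor]
      split
      · simp
      · exact le_trans (ih _ _ _) (by omega)

theorem solutionFor_t_lt (l : List (Int × Int)) (c : PySem.Dict Int Int)
    (arr : PySem.Set Int) (t : Int) (h : l ≠ []) : (solutionFor l c arr t).2.2 < t := by
  match l with
  | (k, v) :: rest =>
      simp only [solutionFor]
      split
      · simp
      · exact lt_of_le_of_lt (solutionFor_t_le rest _ _ _) (by omega)

-- the 'while target > 0' loop; the 'c.items = []' guard only makes the function total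
-- (Python would loop forever there; it is unreachable from solution: target > 0 forces nums ≠ [])
def solutionLoop (c : PySem.Dict Int Int) (arr : PySem.Set Int) (t : Int) : PySem.Set Int :=
  if h0 : 0 < t then
    if hk : c.items = [] then arr
    else
      solutionLoop (solutionFor c.items c arr t).1
        (solutionFor c.items c arr t).2.1 (solutionFor c.items c arr t).2.2
  else arr
termination_by t.toNat
decreasing_by
  have := solutionFor_t_lt c.items c arr t hk
  omega

def solution (nums : List Int) : Int :=
  -- answer = 0 is dead code in A (assigned, never read); counter = Counter(nums);
  -- target = len(nums) // 2; arr = set(); then the while loop; return len(arr)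
  let counter := PySem.Dict.counter nums
  let target := PySem.Int.floordiv (nums.length : Int) 2
  let arr : PySem.Set Int := PySem.Set.empty
  ((solutionLoop counter arr target).length : Int)

-- ===== PORT B =====
def solution_alt (nums : List Int) : Int :=
  min ((PySem.Set.ofList nums).length : Int) (PySem.Int.floordiv (nums.length : Int) 2)

-- ===== PRECONDITION & SPEC =====
def Spec_solution (nums : List Int) (out : Int) : Prop := out = solution_alt nums
instance (nums : List Int) (out : Int) : Decidable (Spec_solution nums out) := by unfold Spec_solution; infer_instance

-- ===== CLAIM (what is proved, stated in full; the proofs are below) =====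
def Claim_equal_solution : Prop := ∀ (nums : List Int), Dom_solution nums → Spec_solution nums (solution nums)

-- ===== LEMMAS AND PROOFS =====

-- a pass over keys already in arr leaves arr unchanged
theorem solutionFor_absorb (l : List (Int × Int)) (c : PySem.Dict Int Int)
    (arr : PySem.Set Int) (t : Int) (h : ∀ p ∈ l, p.1 ∈ arr) :
    (solutionFor l c arr t).2.1 = arr := by
  induction l generalizing c arr t with
  | nil => simp [solutionFor]
  | cons p rest ih =>
      obtain ⟨k, v⟩ := p
      have hk : k ∈ arr := h (k, v) (by simp)
      have hadd : PySem.Set.add arr k = arr := by simp [PySem.Set.add, hk]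
      simp only [solutionFor, hadd]
      split
      · rfl
      · exact ih _ _ _ (fun p hp => h p (by simp [hp]))

-- a pass only modifies keys that are already present, so the key set is preserved
theorem solutionFor_keys (l : List (Int × Int)) (c : PySem.Dict Int Int)
    (arr : PySem.Set Int) (t : Int) (h : ∀ p ∈ l, p.1 ∈ c.keys) :
    (solutionFor l c arr t).1.keys = c.keys := by
  induction l generalizing c arr t with
  | nil => simp [solutionFor]
  | cons p rest ih =>
      obtain ⟨k, v⟩ := p
      have hc : c.contains k = true :=
        (PySem.Dict.contains_iff_mem_keys c k).2 (h (k, v) (by simp))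
      have hk : (c.modify k 0 (· - 1)).keys = c.keys := by
        rw [PySem.Dict.keys_modify, PySem.Dict.keys_insert_of_contains c _ hc]
      simp only [solutionFor]
      split
      · simpa using hk
      · rw [ih _ _ _ (fun p hp => by rw [hk]; exact h p (by simp [hp]))]
        exact hk

-- the exact effect of one pass from a position where every iterated key is fresh
theorem solutionFor_exact (l : List (Int × Int)) (c : PySem.Dict Int Int)
    (arr : PySem.Set Int) (t : Int) (h0 : 0 < t)
    (hnd : (l.map Prod.fst).Nodup) (hfresh : ∀ p ∈ l, p.1 ∉ arr) :
    (solutionFor l c arr t).2.1 = arr ++ (l.map Prod.fst).take (min l.length t.toNat) ∧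
    (solutionFor l c arr t).2.2 = t - min l.length t.toNat := by
  induction l generalizing c arr t with
  | nil => simp [solutionFor]
  | cons p rest ih =>
      obtain ⟨k, v⟩ := p
      have hk : k ∉ arr := hfresh (k, v) (by simp)
      have hadd : PySem.Set.add arr k = arr ++ [k] := by simp [PySem.Set.add, hk]
      simp only [solutionFor, hadd]
      split
      · -- t - 1 ≤ 0, i.e. t = 1 : exactly one key taken
        rename_i hle
        have ht1 : t = 1 := by omega
        subst ht1
        simp
      · rename_i hgt
        have h1 : 0 < t - 1 := by omega
        have hnd' : (rest.map Prod.fst).Nodup := by simp at hnd; exact hnd.2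
        have hkrest : k ∉ rest.map Prod.fst := by simp at hnd; simpa using hnd.1
        have hfresh' : ∀ p ∈ rest, p.1 ∉ arr ++ [k] := by
          intro p hp
          have ha := hfresh p (by simp [hp])
          have hb : p.1 ≠ k := by
            intro he; exact hkrest (he ▸ List.mem_map_of_mem hp)
          simp [ha, hb]
        obtain ⟨e1, e2⟩ := ih (c.modify k 0 (· - 1)) (arr ++ [k]) (t - 1) h1 hnd' hfresh'
        refine ⟨?_, ?_⟩
        · rw [e1]
          have hm : min (rest.length + 1) t.toNat = min rest.length (t - 1).toNat + 1 := by
            omega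
          simp only [List.map_cons, List.length_cons, hm, List.take_succ_cons,
            List.append_assoc, List.singleton_append]
        · rw [e2]
          have : min ((k, v) :: rest).length t.toNat
              = min rest.length (t - 1).toNat + 1 := by simp; omega
          omega

-- once arr contains every key of c, the while loop returns arr unchanged
theorem solutionLoop_absorb (n : Nat) (t : Int) (hn : t.toNat = n)
    (c : PySem.Dict Int Int) (arr : PySem.Set Int)
    (h : ∀ x ∈ c.keys, x ∈ arr) : solutionLoop c arr t = arr := by
  induction n using Nat.strong_induction_on generalizing t c arr with
  | _ n ih =>
      rw [solutionLoop]
      split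
      · rename_i h0
        split
        · rfl
        · rename_i hk
          have hmem : ∀ p ∈ c.items, p.1 ∈ arr := fun p hp =>
            h p.1 (PySem.Dict.mem_keys_of_mem_items c hp)
          have harr : (solutionFor c.items c arr t).2.1 = arr :=
            solutionFor_absorb _ _ _ _ hmem
          have hkeys : (solutionFor c.items c arr t).1.keys = c.keys :=
            solutionFor_keys _ _ _ _ (fun p hp => PySem.Dict.mem_keys_of_mem_items c hp)
          have hlt : (solutionFor c.items c arr t).2.2 < t :=
            solutionFor_t_lt _ _ _ _ hk
          exact (ih (solutionFor c.items c arr t).2.2.toNat (by omega) _ rfl _ _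
            (by rw [hkeys, harr]; exact h)).trans harr
      · rfl

-- the keys iterated by the first pass are exactly set(nums), in first-occurrence order
theorem counter_items_map_fst (nums : List Int) :
    ((PySem.Dict.counter nums).items.map Prod.fst) = PySem.Set.ofList nums := by
  have := PySem.Dict.keys_counter (xs := nums)
  simpa [PySem.Dict.keys] using this

-- ===== VERDICT (by name: the statement is the Claim_ definition above) =====
theorem solution_spec : Claim_equal_solution := by
  intro nums _
  unfold Spec_solution solution solution_alt
  show ((solutionLoop (PySem.Dict.counter nums) PySem.Set.empty
      (PySem.Int.floordiv (nums.length : Int) 2)).length : Int)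
    = min ((PySem.Set.ofList nums).length : Int) (PySem.Int.floordiv (nums.length : Int) 2)
  have hfd : PySem.Int.floordiv (nums.length : Int) 2 = ((nums.length / 2 : Nat) : Int) := by
    exact_mod_cast PySem.Int.floordiv_natCast nums.length 2
  set K := PySem.Set.ofList nums with hK
  set t0 : Nat := nums.length / 2 with ht0
  rw [hfd]
  by_cases h0 : 0 < t0
  · -- nums has at least 2 elements, so Counter(nums) has at least one item
    have hne : nums ≠ [] := by
      intro he; subst he; simp [ht0] at h0
    have hKne : K ≠ [] := by
      intro he
      have : nums.head hne ∈ K := (PySem.Set.mem_ofList nums _).2 (List.head_mem hne)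
      simp [he] at this
    have hitems : (PySem.Dict.counter nums).items ≠ [] := by
      intro he
      have hmf := counter_items_map_fst nums
      rw [he] at hmf
      exact hKne (by simpa [hK] using hmf.symm)
    have hKlen : K.length ≤ nums.length := PySem.Set.length_ofList_le nums
    rw [solutionLoop, dif_pos (by exact_mod_cast h0), dif_neg hitems]
    have hnd : ((PySem.Dict.counter nums).items.map Prod.fst).Nodup := by
      rw [counter_items_map_fst]; exact PySem.Set.nodup_ofList nums
    have hfresh : ∀ p ∈ (PySem.Dict.counter nums).items,
        p.1 ∉ (PySem.Set.empty : PySem.Set Int) := by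
      intro p _; simp [PySem.Set.empty]
    obtain ⟨e1, e2⟩ := solutionFor_exact (PySem.Dict.counter nums).items
      (PySem.Dict.counter nums) PySem.Set.empty ((t0 : Nat) : Int)
      (by exact_mod_cast h0) hnd hfresh
    have hlenitems : (PySem.Dict.counter nums).items.length = K.length := by
      calc (PySem.Dict.counter nums).items.length
          = ((PySem.Dict.counter nums).items.map Prod.fst).length := by simp
        _ = K.length := by rw [counter_items_map_fst]
    rw [counter_items_map_fst] at e1
    have htoNat : (((t0 : Nat) : Int)).toNat = t0 := by simp
    by_cases hcase : t0 ≤ K.length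
    · -- the loop stops inside the first pass: target hits 0 after t0 fresh keys
      have hmin : min (PySem.Dict.counter nums).items.length
          (((t0 : Nat) : Int)).toNat = t0 := by rw [hlenitems, htoNat]; omega
      have ht2 : (solutionFor (PySem.Dict.counter nums).items
          (PySem.Dict.counter nums) PySem.Set.empty ((t0 : Nat) : Int)).2.2 = 0 := by
        rw [e2, hmin]; omega
      rw [ht2, solutionLoop.eq_def, dif_neg (by omega), e1, hmin]
      simp only [PySem.Set.empty, List.nil_append, List.length_take]
      rw [← hK]
      omega
    · -- the first pass exhausts all distinct keys; later passes add nothing new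
      have hmin : min (PySem.Dict.counter nums).items.length
          (((t0 : Nat) : Int)).toNat = K.length := by rw [hlenitems, htoNat]; omega
      have harr1 : (solutionFor (PySem.Dict.counter nums).items
          (PySem.Dict.counter nums) PySem.Set.empty ((t0 : Nat) : Int)).2.1 = K := by
        rw [e1, hmin, ← hK]; simp [PySem.Set.empty]
      have hkeys1 : (solutionFor (PySem.Dict.counter nums).items
          (PySem.Dict.counter nums) PySem.Set.empty ((t0 : Nat) : Int)).1.keys
          = (PySem.Dict.counter nums).keys :=
        solutionFor_keys _ _ _ _ (fun p hp => PySem.Dict.mem_keys_of_mem_items _ hp)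
      rw [solutionLoop_absorb _ _ rfl _ _ (by
        rw [hkeys1, PySem.Dict.keys_counter, harr1]
        exact fun x hx => hx)]
      rw [harr1]
      omega
  · -- target = 0 : the while loop never runs; A returns 0 = min(|set(nums)|, 0)
    have ht00 : t0 = 0 := by omega
    rw [ht00]
    rw [solutionLoop.eq_def, dif_neg (by norm_num)]
    simp [PySem.Set.empty]
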